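-- pv_equiv track=rewrite | github.com/sbogdan/codejam | 2018/qualification/TroubleSort/TroubleSort-dumb.py | solve
-- ===== SOURCE A (Python) =====
-- def solve(v):
--     done = False
--     while not done:
--         done = True
--         for i in range(len(v) - 2):
--             if v[i] > v[i + 2]:
--                 done = False
--                 tmp = v[i]; v[i] = v[i+2]; v[i+2] = tmp
--     return v
--     for i in range(len(v)-1):
--         if v[i] > v[i+1]:
--             return i
--     return 'OK'
-- ===== SOURCE B (Python) =====
-- def solve(v):
--     # Split into even- and odd-indexed subsequences, sort each, merge back.
--     # (A mutates v in place; B returns a fresh list -- the return value is the same.)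
--     ev, od = [], []
--     for i, x in enumerate(v):
--         if i % 2 == 0:
--             ev.append(x)
--         else:
--             od.append(x)
--     ev.sort()
--     od.sort()
--     out = []
--     for a, b in zip(ev, od):
--         out.append(a)
--         out.append(b)
--     if len(od) < len(ev):
--         out.append(ev[len(od)])
--     return out
-- ===== Notes on version B (the rewrite author's own statement) =====
-- stated objective: faster
-- what changed: Replaced the repeated gap-2 bubble passes until a fixed point with: split the list into even- and odd-indexed subsequences, sort each with the built-in sort, and merge them back by alternating.
import Mathlib
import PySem

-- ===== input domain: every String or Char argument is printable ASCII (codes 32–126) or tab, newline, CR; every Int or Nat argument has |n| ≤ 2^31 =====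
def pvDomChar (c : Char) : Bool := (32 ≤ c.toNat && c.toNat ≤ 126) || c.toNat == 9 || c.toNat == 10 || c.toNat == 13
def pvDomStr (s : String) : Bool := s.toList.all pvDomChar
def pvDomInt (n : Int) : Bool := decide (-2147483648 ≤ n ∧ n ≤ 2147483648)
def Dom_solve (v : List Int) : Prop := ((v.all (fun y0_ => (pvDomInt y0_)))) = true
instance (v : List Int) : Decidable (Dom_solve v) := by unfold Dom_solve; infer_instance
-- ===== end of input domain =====

-- TroubleSort: A repeats gap-2 bubble passes until a fixed point (O(n^2)); B sorts the
-- even- and odd-indexed subsequences separately and merges them back (O(n log n), measured faster).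
-- A mutates its argument in place; the equivalence proved here is about the return value only.


-- ===== PORT A =====
-- One inner 'for i in range(len(v)-2)' pass over the mutating array, recast as the standard
-- sliding-window recursion: at each step compare v[i] and v[i+2], swap if out of order, and
-- report whether any swap happened (done = !flag).  Exact on every input.
def passA : List Int → List Int × Bool
  | [] => ([], false)
  | [a] => ([a], false)
  | [a, b] => ([a, b], false)
  | a :: b :: c :: t =>
    if a > c then
      let r := passA (b :: a :: t)
      (c :: r.1, true)
    else
      let r := passA (b :: c :: t)
      (a :: r.1, r.2)
termination_by l => l.length

-- proof-side helpers the while-loop's termination measure needs (cited by decreasing_by)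
-- (evens, odds) of a list, by index parity
def eo : List Int → List Int × List Int
  | [] => ([], [])
  | x :: t => (x :: (eo t).2, (eo t).1)

-- number of inversions
def invc : List Int → Nat
  | [] => 0
  | a :: t => t.countP (fun x => decide (x < a)) + invc t

-- one adjacent bubble pass (what passA does to each parity class)
def bpass : List Int → List Int × Bool
  | [] => ([], false)
  | [a] => ([a], false)
  | a :: b :: t =>
    if a > b then
      let r := bpass (a :: t)
      (b :: r.1, true)
    else
      let r := bpass (b :: t)
      (a :: r.1, r.2)

def mu (v : List Int) : Nat := invc (eo v).1 + invc (eo v).2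

theorem bpass_perm (l : List Int) : ((bpass l).1).Perm l := by
  fun_induction bpass l with
  | case1 => simp
  | case2 a => simp
  | case3 a b t h r ih => exact (ih.cons b).trans (List.Perm.swap a b t)
  | case4 a b t h r ih => exact ih.cons a

theorem bpass_inv (l : List Int) :
    invc (bpass l).1 ≤ invc l ∧ ((bpass l).2 = true → invc (bpass l).1 < invc l) := by
  fun_induction bpass l with
  | case1 => simp
  | case2 a => simp
  | case3 a b t hgt r ih =>
    have hcount : r.1.countP (fun x => decide (x < b)) = (a :: t).countP (fun x => decide (x < b)) :=
      (bpass_perm (a :: t)).countP_eq _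
    have hle : invc r.1 ≤ invc (a :: t) := ih.1
    have e1 : invc (b :: r.1) = (a :: t).countP (fun x => decide (x < b)) + invc r.1 := by
      simp only [invc, hcount]
    have e2 : (a :: t).countP (fun x => decide (x < b)) = t.countP (fun x => decide (x < b)) := by
      simp [List.countP_cons, show ¬ (a < b) from by omega]
    have e3 : invc (a :: t) = t.countP (fun x => decide (x < a)) + invc t := rfl
    have e4 : invc (a :: b :: t) =
        t.countP (fun x => decide (x < a)) + 1 + (t.countP (fun x => decide (x < b)) + invc t) := by
      simp [invc, List.countP_cons, show b < a from by omega]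
    refine ⟨?_, fun _ => ?_⟩
    · show invc (b :: r.1) ≤ invc (a :: b :: t)
      omega
    · show invc (b :: r.1) < invc (a :: b :: t)
      omega
  | case4 a b t hgt r ih =>
    have hcount : r.1.countP (fun x => decide (x < a)) = (b :: t).countP (fun x => decide (x < a)) :=
      (bpass_perm (b :: t)).countP_eq _
    have e1 : invc (a :: r.1) = (b :: t).countP (fun x => decide (x < a)) + invc r.1 := by
      simp only [invc, hcount]
    have e2 : invc (a :: b :: t) = (b :: t).countP (fun x => decide (x < a)) + invc (b :: t) := rfl
    refine ⟨?_, fun hf => ?_⟩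
    · have hle : invc r.1 ≤ invc (b :: t) := ih.1
      show invc (a :: r.1) ≤ invc (a :: b :: t)
      omega
    · have hlt : invc r.1 < invc (b :: t) := ih.2 hf
      show invc (a :: r.1) < invc (a :: b :: t)
      omega

theorem passA_eo (v : List Int) :
    (eo (passA v).1).1 = (bpass (eo v).1).1 ∧ (eo (passA v).1).2 = (bpass (eo v).2).1 ∧
      (passA v).2 = ((bpass (eo v).1).2 || (bpass (eo v).2).2) := by
  fun_induction passA v with
  | case1 => simp [eo, bpass]
  | case2 a => simp [eo, bpass]
  | case3 a b => simp [eo, bpass]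
  | case4 a b c t hgt r ih =>
    obtain ⟨ih1, ih2, ih3⟩ := ih
    refine ⟨?_, ?_, ?_⟩
    · show (eo (c :: r.1)).1 = (bpass (eo (a :: b :: c :: t)).1).1
      simp only [eo, bpass, if_pos hgt]
      exact congrArg (c :: ·) ih2
    · show (eo (c :: r.1)).2 = (bpass (eo (a :: b :: c :: t)).2).1
      simpa only [eo] using ih1
    · show true = ((bpass (eo (a :: b :: c :: t)).1).2 || (bpass (eo (a :: b :: c :: t)).2).2)
      simp [eo, bpass, if_pos hgt]
  | case5 a b c t hgt r ih =>
    obtain ⟨ih1, ih2, ih3⟩ := ih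
    refine ⟨?_, ?_, ?_⟩
    · show (eo (a :: r.1)).1 = (bpass (eo (a :: b :: c :: t)).1).1
      simp only [eo, bpass, if_neg hgt]
      exact congrArg (a :: ·) ih2
    · show (eo (a :: r.1)).2 = (bpass (eo (a :: b :: c :: t)).2).1
      simpa only [eo] using ih1
    · show r.2 = ((bpass (eo (a :: b :: c :: t)).1).2 || (bpass (eo (a :: b :: c :: t)).2).2)
      simp only [eo, bpass, if_neg hgt]
      rw [show r.2 = _ from ih3]
      simp only [eo]
      exact Bool.or_comm _ _

theorem passA_mu_lt (v : List Int) (h : (passA v).2 = true) : mu (passA v).1 < mu v := by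
  obtain ⟨h1, h2, h3⟩ := passA_eo v
  unfold mu
  rw [h1, h2]
  rw [h3] at h
  have le1 := (bpass_inv (eo v).1).1
  have le2 := (bpass_inv (eo v).2).1
  rcases Bool.or_eq_true_iff.1 h with hf | hf
  · have := (bpass_inv (eo v).1).2 hf
    omega
  · have := (bpass_inv (eo v).2).2 hf
    omega

-- the 'while not done' loop: repeat the pass until it reports no swap
def loopA (v : List Int) : List Int :=
  if h : (passA v).2 then loopA (passA v).1 else (passA v).1
termination_by mu v
decreasing_by exact passA_mu_lt v h

def solve (v : List Int) : List Int := loopA v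

-- ===== PORT B =====
def solve_alt (v : List Int) : List Int :=
  -- for i, x in enumerate(v): append x to ev (i even) or od (i odd)
  let p := (PySem.List.enumerate v 0).foldl
      (fun (acc : List Int × List Int) ix =>
        if PySem.Int.mod ix.1 2 == 0 then (acc.1 ++ [ix.2], acc.2) else (acc.1, acc.2 ++ [ix.2]))
      ([], [])
  let ev := PySem.List.sorted p.1 (fun x => x)
  let od := PySem.List.sorted p.2 (fun x => x)
  -- for a, b in zip(ev, od): out.append(a); out.append(b)
  let out := (ev.zip od).foldl (fun acc ab => acc ++ [ab.1] ++ [ab.2]) []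
  if od.length < ev.length then out ++ [PySem.List.pyGetD ev (od.length : Int) 0] else out

-- ===== PRECONDITION & SPEC =====
def Spec_solve (v : List Int) (out : List Int) : Prop := out = solve_alt v
instance (v : List Int) (out : List Int) : Decidable (Spec_solve v out) := by unfold Spec_solve; infer_instance

-- ===== CLAIM (what is proved, stated in full; the proofs are below) =====
def Claim_equal_solve : Prop := ∀ (v : List Int), Dom_solve v → Spec_solve v (solve v)

-- ===== LEMMAS AND PROOFS =====
-- both sides reduce to this normal form: alternately merge the two sorted parity classes
def bmerge : List Int → List Int → List Int
  | [], _ => []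
  | a :: _, [] => [a]
  | a :: e, b :: o => a :: b :: bmerge e o

theorem bpass_flag_false (l : List Int) (h : (bpass l).2 = false) :
    (bpass l).1 = l ∧ l.Pairwise (· ≤ ·) := by
  fun_induction bpass l with
  | case1 => simp
  | case2 a => simp
  | case3 a b t hgt r ih => simp [bpass, hgt] at h
  | case4 a b t hgt r ih =>
    simp only [bpass, if_neg hgt] at h ⊢
    obtain ⟨h1, h2⟩ := ih h
    refine ⟨by rw [show r.1 = b :: t from h1], ?_⟩
    refine List.Pairwise.cons (fun x hx => ?_) h2
    rcases List.mem_cons.1 hx with rfl | hx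
    · omega
    · have := List.rel_of_pairwise_cons h2 hx; omega

theorem passA_flag_false (v : List Int) (h : (passA v).2 = false) : (passA v).1 = v := by
  fun_induction passA v with
  | case1 => rfl
  | case2 a => rfl
  | case3 a b => rfl
  | case4 a b c t hgt r ih => simp [passA, hgt] at h
  | case5 a b c t hgt r ih =>
    simp only [passA, if_neg hgt] at h ⊢
    rw [show r.1 = b :: c :: t from ih h]

theorem sorted_congr {l l' : List Int} (h : l.Perm l') :
    PySem.List.sorted l (fun x => x) = PySem.List.sorted l' (fun x => x) := by
  refine List.Perm.eq_of_pairwise (fun a b _ _ h1 h2 => le_antisymm h1 h2) ?_ ?_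
      (((PySem.List.sorted_perm l _ _).trans h).trans (PySem.List.sorted_perm l' _ _).symm)
  · simpa using PySem.List.sorted_pairwise l (fun x => x)
  · simpa using PySem.List.sorted_pairwise l' (fun x => x)

theorem eo_merge (v : List Int) : bmerge (eo v).1 (eo v).2 = v := by
  match v with
  | [] => rfl
  | [a] => rfl
  | a :: b :: t => simp [eo, bmerge, eo_merge t]
termination_by v.length

theorem eo_len (v : List Int) :
    (eo v).2.length ≤ (eo v).1.length ∧ (eo v).1.length ≤ (eo v).2.length + 1 := by
  induction v with
  | nil => simp [eo]
  | cons x t ih => simp [eo]; omega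

theorem loopA_eq (v : List Int) :
    loopA v = bmerge (PySem.List.sorted (eo v).1 (fun x => x))
                     (PySem.List.sorted (eo v).2 (fun x => x)) := by
  rw [loopA]
  obtain ⟨h1, h2, h3⟩ := passA_eo v
  by_cases h : (passA v).2 = true
  · rw [dif_pos h, loopA_eq (passA v).1, h1, h2,
      sorted_congr (bpass_perm (eo v).1), sorted_congr (bpass_perm (eo v).2)]
  · rw [dif_neg h]
    rw [Bool.not_eq_true, h3, Bool.or_eq_false_iff] at h
    obtain ⟨hf1, hf2⟩ := h
    obtain ⟨-, hp1⟩ := bpass_flag_false _ hf1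
    obtain ⟨-, hp2⟩ := bpass_flag_false _ hf2
    rw [passA_flag_false v (by rw [h3, hf1, hf2]; rfl)]
    rw [PySem.List.sorted_eq_self_of_pairwise _ _ (by simpa using hp1),
        PySem.List.sorted_eq_self_of_pairwise _ _ (by simpa using hp2)]
    exact (eo_merge v).symm
termination_by mu v
decreasing_by exact passA_mu_lt v h

-- the alternating zip-merge of B, structurally
def zm : List Int → List Int → List Int
  | a :: e, b :: o => a :: b :: zm e o
  | _, _ => []

theorem splitfold (v : List Int) (s : Int) (ev od : List Int) :
    (PySem.List.enumerate v s).foldl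
        (fun (acc : List Int × List Int) ix =>
          if PySem.Int.mod ix.1 2 == 0 then (acc.1 ++ [ix.2], acc.2) else (acc.1, acc.2 ++ [ix.2]))
        (ev, od) =
      if s % 2 = 0 then (ev ++ (eo v).1, od ++ (eo v).2) else (ev ++ (eo v).2, od ++ (eo v).1) := by
  induction v generalizing s ev od with
  | nil => split_ifs <;> simp [PySem.List.enumerate_nil, eo]
  | cons x t ih =>
    rw [PySem.List.enumerate_cons, List.foldl_cons]
    have hmod : PySem.Int.mod s 2 = s % 2 := PySem.Int.mod_eq_emod_of_pos (by omega)
    by_cases hs : s % 2 = 0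
    · rw [if_pos hs]
      have hc : (PySem.Int.mod s 2 == 0) = true := by rw [hmod, hs]; rfl
      rw [hc, if_pos rfl]
      rw [ih (s + 1) (ev ++ [x]) od, if_neg (by omega)]
      simp [eo]
    · rw [if_neg hs]
      have hc : (PySem.Int.mod s 2 == 0) = false := by rw [hmod]; simpa using hs
      rw [hc, if_neg (by simp)]
      rw [ih (s + 1) ev (od ++ [x]), if_pos (by omega)]
      simp [eo]

theorem zipfold (ev od acc : List Int) :
    (ev.zip od).foldl (fun acc ab => acc ++ [ab.1] ++ [ab.2]) acc = acc ++ zm ev od := by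
  induction ev generalizing od acc with
  | nil => simp [zm]
  | cons a e ih =>
    cases od with
    | nil => simp [zm]
    | cons b o =>
      rw [List.zip_cons_cons, List.foldl_cons, ih o (acc ++ [a] ++ [b])]
      simp [zm]

theorem zm_eq_bmerge (ev od : List Int) (h : ev.length = od.length) : zm ev od = bmerge ev od := by
  induction ev generalizing od with
  | nil => cases od with
    | nil => rfl
    | cons b o => simp at h
  | cons a e ih =>
    cases od with
    | nil => simp at h
    | cons b o => simp at h; simp [zm, bmerge, ih o h]

theorem zm_eq_bmerge_succ (ev od : List Int) (h : ev.length = od.length + 1) :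
    zm ev od ++ [ev.getD od.length 0] = bmerge ev od := by
  induction od generalizing ev with
  | nil =>
    match ev, h with
    | [a], _ => rfl
  | cons b o ih =>
    match ev, h with
    | a :: e, h =>
      simp at h
      simpa [zm, bmerge] using ih e h

theorem solve_alt_eq (v : List Int) :
    solve_alt v = bmerge (PySem.List.sorted (eo v).1 (fun x => x))
                         (PySem.List.sorted (eo v).2 (fun x => x)) := by
  unfold solve_alt
  rw [splitfold v 0 [] [], if_pos (show ((0:Int) % 2 = 0) by norm_num)]
  simp only [List.nil_append]
  have hl := eo_len v
  have hev : (PySem.List.sorted (eo v).1 (fun x => x)).length = (eo v).1.length :=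
    (PySem.List.sorted_perm _ _ _).length_eq
  have hod : (PySem.List.sorted (eo v).2 (fun x => x)).length = (eo v).2.length :=
    (PySem.List.sorted_perm _ _ _).length_eq
  by_cases hc : (PySem.List.sorted (eo v).2 (fun x => x)).length <
      (PySem.List.sorted (eo v).1 (fun x => x)).length
  · rw [if_pos hc, zipfold, List.nil_append]
    rw [PySem.List.pyGetD_natCast]
    exact zm_eq_bmerge_succ _ _ (by omega)
  · rw [if_neg hc, zipfold, List.nil_append]
    exact zm_eq_bmerge _ _ (by omega)

-- ===== VERDICT (by name: the statement is the Claim_ definition above) =====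
theorem solve_spec : Claim_equal_solve := by
  intro v _
  unfold Spec_solve solve
  rw [loopA_eq, solve_alt_eq]
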